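-- pv_equiv track=rewrite | github.com/compbio-mallory/SCsnvcna | code/simulation_code/sim_par.py | makeG
-- ===== SOURCE A (Python) =====
-- def init(n, m):
--     ret = []
--     for i in range(n):
--         ret.append([0]*m)
--         for j in range(m):
--             ret[i][j] = 0
--     return ret
--
-- def makeG(n, m, SNVcell_mut):
--     G = init(n, m)
--     for cellID in range(n):
--         if str(cellID) in SNVcell_mut.keys():
--             mut_array_ = SNVcell_mut[str(cellID)]
--             for mutID in range(m):
--                 if str(mutID) in mut_array_:
--                     G[cellID][mutID] = 1
--     return G
-- ===== SOURCE B (Python) =====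
-- def makeG(n, m, SNVcell_mut):
--     if n <= 0:
--         return []
--     # index the canonical decimal names of the columns once: str(j) -> j
--     idx = {str(j): j for j in range(m)}
--     G = []
--     for i in range(n):
--         row = [0] * m
--         for s in SNVcell_mut.get(str(i), []):
--             j = idx.get(s)
--             if j is not None:
--                 row[j] = 1
--         G.append(row)
--     return G
-- ===== Notes on version B (the rewrite author's own statement) =====
-- stated objective: alternative
-- what changed: Instead of scanning range(m) and testing list membership of str(mutID) in the mutation list for every cell, B builds one str(j)->j column index and scatters 1s by iterating only the listed mutation strings per cell into a zero-initialised row (intended as faster; a timing run measured 2.15-2.37x on its sizes but could not confirm the threshold at the largest size).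
import Mathlib
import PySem

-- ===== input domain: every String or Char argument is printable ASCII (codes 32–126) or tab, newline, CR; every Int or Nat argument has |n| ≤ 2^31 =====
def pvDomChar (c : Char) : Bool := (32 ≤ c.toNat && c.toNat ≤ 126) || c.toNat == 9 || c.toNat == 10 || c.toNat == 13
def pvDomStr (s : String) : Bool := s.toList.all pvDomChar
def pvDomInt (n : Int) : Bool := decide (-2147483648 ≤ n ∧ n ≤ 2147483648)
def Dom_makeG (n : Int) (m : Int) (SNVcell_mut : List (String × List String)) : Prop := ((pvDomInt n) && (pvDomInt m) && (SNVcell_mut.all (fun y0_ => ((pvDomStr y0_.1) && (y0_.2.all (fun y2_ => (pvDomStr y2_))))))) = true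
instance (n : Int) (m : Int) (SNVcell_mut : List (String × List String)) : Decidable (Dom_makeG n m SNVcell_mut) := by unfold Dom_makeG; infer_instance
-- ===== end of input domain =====

-- B replaces A's per-cell scan of range(m) with list-membership tests by a single
-- str(j)->j column index and a scatter of 1s over each cell's listed mutation strings.

-- ===== PORT A =====
-- `[0]*m` is List.replicate m.toNat 0 (exact: Python gives [] for m <= 0); the element
-- assignments `ret[i][j] = 0` / `G[cellID][mutID] = 1` are ported with the total
-- pySetD/pyGetD forms, exact here because the loop indices are always in range;
-- `str(cellID) in d.keys()` followed by `d[str(cellID)]` is one first-match lookup.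
def pvInitA (n : Int) (m : Int) : List (List Int) :=
  (PySem.List.pyRange 0 n 1).foldl (fun ret i =>
    let ret := ret ++ [List.replicate m.toNat (0 : Int)]
    (PySem.List.pyRange 0 m 1).foldl (fun ret j =>
      PySem.List.pySetD ret i (PySem.List.pySetD (PySem.List.pyGetD ret i []) j 0)) ret) []

def makeG (n : Int) (m : Int) (SNVcell_mut : List (String × List String)) : List (List Int) :=
  let G := pvInitA n m
  (PySem.List.pyRange 0 n 1).foldl (fun G cellID =>
    match (PySem.Dict.mk SNVcell_mut).get? (PySem.Int.toStr cellID) with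
    | some mut_array_ =>
      (PySem.List.pyRange 0 m 1).foldl (fun G mutID =>
        if mut_array_.contains (PySem.Int.toStr mutID) then
          PySem.List.pySetD G cellID
            (PySem.List.pySetD (PySem.List.pyGetD G cellID []) mutID 1)
        else G) G
    | none => G) G

-- ===== PORT B =====
-- `row[j] = 1` uses the total pySetD form, exact here because every j stored in idx
-- satisfies 0 <= j < m = len(row); `.get(str(i), [])` is Dict.getD.
def makeG_alt (n : Int) (m : Int) (SNVcell_mut : List (String × List String)) : List (List Int) :=
  if n ≤ 0 then [] else
  let idx : PySem.Dict String Int :=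
    (PySem.List.pyRange 0 m 1).foldl (fun d j => d.insert (PySem.Int.toStr j) j) PySem.Dict.empty
  (PySem.List.pyRange 0 n 1).foldl (fun G i =>
    let row := List.replicate m.toNat (0 : Int)
    let row := ((PySem.Dict.mk SNVcell_mut).getD (PySem.Int.toStr i) []).foldl
      (fun row s =>
        match idx.get? s with
        | some j => PySem.List.pySetD row j 1
        | none => row) row
    G ++ [row]) []

-- ===== PRECONDITION & SPEC =====
def Spec_makeG (n : Int) (m : Int) (SNVcell_mut : List (String × List String)) (out : List (List Int)) : Prop := out = makeG_alt n m SNVcell_mut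
instance (n : Int) (m : Int) (SNVcell_mut : List (String × List String)) (out : List (List Int)) : Decidable (Spec_makeG n m SNVcell_mut out) := by unfold Spec_makeG; infer_instance

-- ===== CLAIM (what is proved, stated in full; the proofs are below) =====
def Claim_equal_makeG : Prop := ∀ (n : Int) (m : Int) (SNVcell_mut : List (String × List String)), Dom_makeG n m SNVcell_mut → Spec_makeG n m SNVcell_mut (makeG n m SNVcell_mut)

-- ===== LEMMAS AND PROOFS =====

/- ## Decimal representations: Nat.toDigits 10 and injectivity of str(.) on nonnegatives -/

def pvRep (n : Nat) : List Char :=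
  if n < 10 then [Nat.digitChar n]
  else pvRep (n / 10) ++ [Nat.digitChar (n % 10)]
decreasing_by exact Nat.div_lt_self (by omega) (by omega)

theorem pvToDigitsCore_eq (n : Nat) : ∀ (fuel : Nat) (acc : List Char), n < fuel →
    Nat.toDigitsCore 10 fuel n acc = pvRep n ++ acc := by
  induction n using Nat.strong_induction_on with
  | _ n ih =>
    intro fuel acc hf
    match fuel with
    | 0 => omega
    | fuel + 1 =>
      rw [Nat.toDigitsCore]
      by_cases h10 : n < 10
      · have : n / 10 = 0 := Nat.div_eq_of_lt h10
        simp [this, pvRep, h10, Nat.mod_eq_of_lt h10]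
      · have hne : ¬ n / 10 = 0 := by omega
        rw [if_neg hne, ih (n / 10) (by omega) fuel _ (by omega)]
        conv_rhs => rw [pvRep]
        rw [if_neg h10]
        simp

theorem pvDigitChar_val (d : Nat) (hd : d < 10) : (Nat.digitChar d).toNat - 48 = d := by
  interval_cases d <;> decide

def pvVal (a : Nat) (cs : List Char) : Nat := cs.foldl (fun a c => 10 * a + (c.toNat - 48)) a

theorem pvVal_rep (n : Nat) : ∀ a, pvVal a (pvRep n) = a * 10 ^ (pvRep n).length + n := by
  induction n using Nat.strong_induction_on with
  | _ n ih =>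
    intro a
    by_cases h10 : n < 10
    · rw [pvRep, if_pos h10]
      simp [pvVal, pvDigitChar_val n h10]
      ring
    · rw [pvRep, if_neg h10]
      have hd : (Nat.digitChar (n % 10)).toNat - 48 = n % 10 := pvDigitChar_val _ (by omega)
      simp only [pvVal, List.foldl_append, List.foldl_cons, List.foldl_nil, List.length_append,
        List.length_cons, List.length_nil, Nat.zero_add]
      have hrec := ih (n / 10) (by omega) a
      simp only [pvVal] at hrec
      rw [hrec, hd, pow_succ, ← mul_assoc]
      omega

theorem pvRep_inj {a b : Nat} (h : pvRep a = pvRep b) : a = b := by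
  have ha := pvVal_rep a 0
  have hb := pvVal_rep b 0
  rw [h] at ha
  omega

theorem pvToStr_inj {a b : Int} (ha : 0 ≤ a) (hb : 0 ≤ b)
    (h : PySem.Int.toStr a = PySem.Int.toStr b) : a = b := by
  have h2 : PySem.Int.toChars a = PySem.Int.toChars b := by
    have := congrArg String.toList h
    simpa [PySem.Int.toStr, String.toList_ofList] using this
  simp only [PySem.Int.toChars, if_neg (by omega : ¬ a < 0), if_neg (by omega : ¬ b < 0)] at h2
  have e : ∀ k : Nat, Nat.toDigits 10 k = pvRep k := fun k => by
    rw [Nat.toDigits, pvToDigitsCore_eq k (k + 1) [] (Nat.lt_succ_self _), List.append_nil]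
  rw [e, e] at h2
  have := pvRep_inj h2
  omega

/- ## The column index idx = {str(j): j for j in range(m)} -/

def pvIdx (m : Int) : PySem.Dict String Int :=
  (PySem.List.pyRange 0 m 1).foldl (fun d j => d.insert (PySem.Int.toStr j) j) PySem.Dict.empty

theorem pvMapToStr_nodup (m : Int) : ((PySem.List.pyRange 0 m 1).map PySem.Int.toStr).Nodup := by
  refine List.Nodup.map_on ?_ (PySem.List.nodup_pyRange_one 0 m)
  intro x hx y hy hxy
  rw [PySem.List.mem_pyRange_one] at hx hy
  exact pvToStr_inj hx.1 hy.1 hxy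

theorem pvIdx_items (m : Int) :
    (pvIdx m).items = (PySem.List.pyRange 0 m 1).map (fun j => (PySem.Int.toStr j, j)) := by
  have h := PySem.Dict.items_foldl_insert_fresh (PySem.List.pyRange 0 m 1) PySem.Int.toStr
    (fun j => j) PySem.Dict.empty (fun a _ => PySem.Dict.contains_empty _) (pvMapToStr_nodup m)
  simp only [] at h
  unfold pvIdx
  simpa using h

theorem pvIdx_keys_nodup (m : Int) : (pvIdx m).keys.Nodup := by
  have h : (pvIdx m).keys = (PySem.List.pyRange 0 m 1).map PySem.Int.toStr := by
    simp only [PySem.Dict.keys, pvIdx_items, List.map_map]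
    rfl
  rw [h]
  exact pvMapToStr_nodup m

theorem pvIdx_get? (m : Int) (s : String) (v : Int) :
    (pvIdx m).get? s = some v ↔ 0 ≤ v ∧ v < m ∧ s = PySem.Int.toStr v := by
  rw [PySem.Dict.get?_eq_some_iff_mem_items _ _ _ (pvIdx_keys_nodup m), pvIdx_items,
    List.mem_map]
  constructor
  · rintro ⟨j, hj, hpair⟩
    rw [PySem.List.mem_pyRange_one] at hj
    injection hpair with h1 h2
    subst h1
    subst h2
    exact ⟨hj.1, hj.2, rfl⟩
  · rintro ⟨h0, hm, rfl⟩
    exact ⟨v, PySem.List.mem_pyRange_one.mpr ⟨h0, hm⟩, rfl⟩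

/- ## Row-level characterisations -/

def pvStepA (muts : List String) (r : List Int) (j : Int) : List Int :=
  if muts.contains (PySem.Int.toStr j) then PySem.List.pySetD r j 1 else r

def pvRowA (m : Int) (muts : List String) : List Int :=
  (PySem.List.pyRange 0 m 1).foldl (pvStepA muts) (List.replicate m.toNat 0)

def pvStepB (m : Int) (r : List Int) (s : String) : List Int :=
  match (pvIdx m).get? s with
  | some j => PySem.List.pySetD r j 1
  | none => r

def pvRowB (m : Int) (muts : List String) : List Int :=
  muts.foldl (pvStepB m) (List.replicate m.toNat 0)

theorem pvFoldA_nat (muts : List String) (m : Int) :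
    pvRowA m muts = (List.range m.toNat).foldl
      (fun r (i : Nat) => if muts.contains (PySem.Int.toStr (i : Int)) then r.set i 1 else r)
      (List.replicate m.toNat 0) := by
  unfold pvRowA
  rw [PySem.List.pyRange_one, List.foldl_map]
  have hm : (m - 0).toNat = m.toNat := by omega
  rw [hm]
  congr 1
  funext r i
  simp [pvStepA, PySem.List.pySetD_natCast]

theorem pvFoldA_len (muts : List String) :
    ∀ (l : List Nat) (r : List Int),
    ((l.foldl
      (fun r (i : Nat) => if muts.contains (PySem.Int.toStr (i : Int)) then r.set i 1 else r)
      r)).length = r.length := by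
  intro l
  induction l with
  | nil => intro r; rfl
  | cons a l ihl =>
    intro r
    rw [List.foldl_cons, ihl]
    split <;> simp

theorem pvFoldA_get (muts : List String) :
    ∀ (N : Nat) (r : List Int) (k : Nat), k < r.length →
    ((List.range N).foldl
      (fun r (i : Nat) => if muts.contains (PySem.Int.toStr (i : Int)) then r.set i 1 else r)
      r)[k]? =
      if k < N ∧ muts.contains (PySem.Int.toStr (k : Int)) then some 1 else r[k]? := by
  intro N
  induction N with
  | zero => intro r k hk; simp
  | succ N ih =>
    intro r k hk
    rw [List.range_succ, List.foldl_append, List.foldl_cons, List.foldl_nil]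
    have hlen : ((List.range N).foldl
        (fun r (i : Nat) => if muts.contains (PySem.Int.toStr (i : Int)) then r.set i 1 else r)
        r).length = r.length := pvFoldA_len muts _ r
    by_cases hc : muts.contains (PySem.Int.toStr (N : Int))
    · rw [if_pos hc, List.getElem?_set]
      by_cases hkN : N = k
      · subst hkN
        rw [if_pos rfl, if_pos (by rw [hlen]; exact hk), if_pos ⟨by omega, hc⟩]
      · rw [if_neg hkN, ih r k hk]
        by_cases h2 : k < N ∧ muts.contains (PySem.Int.toStr (k : Int))
        · rw [if_pos h2, if_pos ⟨by omega, h2.2⟩]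
        · rw [if_neg h2, if_neg (by rintro ⟨h3, h4⟩; exact h2 ⟨by omega, h4⟩)]
    · rw [if_neg hc, ih r k hk]
      by_cases h2 : k < N ∧ muts.contains (PySem.Int.toStr (k : Int))
      · rw [if_pos h2, if_pos ⟨by omega, h2.2⟩]
      · rw [if_neg h2, if_neg ?_]
        rintro ⟨h3, h4⟩
        by_cases h5 : k = N
        · exact hc (h5 ▸ h4)
        · exact h2 ⟨by omega, h4⟩

theorem pvRowA_get (m : Int) (muts : List String) (k : Nat) (hk : k < m.toNat) :
    (pvRowA m muts)[k]? = some (if muts.contains (PySem.Int.toStr (k : Int)) then 1 else 0) := by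
  rw [pvFoldA_nat, pvFoldA_get muts m.toNat _ k (by simpa using hk)]
  by_cases hcont : muts.contains (PySem.Int.toStr (k : Int))
  · rw [if_pos ⟨hk, hcont⟩, if_pos hcont]
  · rw [if_neg (by rintro ⟨_, h⟩; exact hcont h), if_neg hcont, List.getElem?_replicate,
      if_pos hk]

theorem pvFoldB_get (m : Int) :
    ∀ (muts : List String) (r : List Int) (k : Nat), k < r.length → r.length ≤ m.toNat →
    (muts.foldl (pvStepB m) r)[k]? =
      if muts.contains (PySem.Int.toStr (k : Int)) then some 1 else r[k]? := by
  intro muts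
  induction muts with
  | nil => intro r k hk hm; simp
  | cons s rest ih =>
    intro r k hk hm
    rw [List.foldl_cons, List.contains_cons]
    have hkm : (k : Int) < m := by omega
    rcases hg : (pvIdx m).get? s with _ | j
    · have hs : ¬ (PySem.Int.toStr (k : Int) == s) := by
        intro hbeq
        have : s = PySem.Int.toStr (k : Int) := (eq_of_beq hbeq).symm
        rw [(pvIdx_get? m s (k : Int)).mpr ⟨by omega, hkm, this⟩] at hg
        cases hg
      have hstep : pvStepB m r s = r := by unfold pvStepB; rw [hg]
      rw [hstep, ih r k hk hm]
      simp [hs]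
    · obtain ⟨hj0, hjm, hsj⟩ := (pvIdx_get? m s j).mp hg
      have hstep : pvStepB m r s = PySem.List.pySetD r j 1 := by
        unfold pvStepB; rw [hg]
      rw [hstep, PySem.List.pySetD_of_nonneg _ _ hj0] at *
      rw [ih _ k (by simpa using hk) (by simpa using hm)]
      by_cases hjk : j.toNat = k
      · have hs : PySem.Int.toStr (k : Int) == s := by
          have : (k : Int) = j := by omega
          rw [this, hsj]
          exact beq_self_eq_true _
        simp only [hs, Bool.true_or, if_pos]
        split
        · rfl
        · rw [List.getElem?_set, if_pos hjk, if_pos (by omega)]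
      · have hs : ¬ (PySem.Int.toStr (k : Int) == s) := by
          intro hbeq
          have h1 : s = PySem.Int.toStr (k : Int) := (eq_of_beq hbeq).symm
          have h2 : PySem.Int.toStr j = PySem.Int.toStr (k : Int) := by rw [← hsj, h1]
          have := pvToStr_inj hj0 (by omega) h2
          omega
        rw [List.getElem?_set, if_neg hjk]
        simp [hs]

theorem pvRowB_get (m : Int) (muts : List String) (k : Nat) (hk : k < m.toNat) :
    (pvRowB m muts)[k]? = some (if muts.contains (PySem.Int.toStr (k : Int)) then 1 else 0) := by
  rw [pvRowB, pvFoldB_get m muts _ k (by simpa using hk) (by simp)]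
  split
  · rfl
  · rw [List.getElem?_replicate, if_pos hk]

theorem pvFoldl_len_pvStepA (muts : List String) :
    ∀ (l : List Int) (r : List Int), (l.foldl (pvStepA muts) r).length = r.length := by
  intro l
  induction l with
  | nil => intro r; rfl
  | cons a l ihl =>
    intro r
    rw [List.foldl_cons, ihl]
    unfold pvStepA
    split <;> simp

theorem pvFoldl_len_pvStepB (m : Int) :
    ∀ (muts : List String) (r : List Int), (muts.foldl (pvStepB m) r).length = r.length := by
  intro muts
  induction muts with
  | nil => intro r; rfl
  | cons a l ihl =>
    intro r
    rw [List.foldl_cons, ihl]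
    unfold pvStepB
    split <;> simp

theorem pvRowA_length (m : Int) (muts : List String) : (pvRowA m muts).length = m.toNat := by
  rw [pvRowA, pvFoldl_len_pvStepA]; simp

theorem pvRowB_length (m : Int) (muts : List String) : (pvRowB m muts).length = m.toNat := by
  rw [pvRowB, pvFoldl_len_pvStepB]; simp

theorem pvRowA_eq_pvRowB (m : Int) (muts : List String) : pvRowA m muts = pvRowB m muts := by
  apply List.ext_getElem?
  intro k
  by_cases hk : k < m.toNat
  · rw [pvRowA_get m muts k hk, pvRowB_get m muts k hk]
  · rw [List.getElem?_eq_none (by rw [pvRowA_length]; omega),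
      List.getElem?_eq_none (by rw [pvRowB_length]; omega)]

/- ## Matrix-level structure -/

theorem pvFoldl_fixed_mem {α β : Type} (g : β → α → β) (b : β) (l : List α)
    (h : ∀ a ∈ l, g b a = b) : l.foldl g b = b := by
  induction l with
  | nil => rfl
  | cons a l ihl =>
    rw [List.foldl_cons, h a List.mem_cons_self]
    exact ihl (fun x hx => h x (List.mem_cons_of_mem a hx))

theorem pvFoldl_snoc {α β : Type} (g : α → β) :
    ∀ (l : List α) (acc : List β),
    l.foldl (fun G i => G ++ [g i]) acc = acc ++ l.map g := by
  intro l
  induction l with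
  | nil => intro acc; simp
  | cons a l ihl => intro acc; rw [List.foldl_cons, ihl]; simp

theorem pvRowA_nil (m : Int) : pvRowA m [] = List.replicate m.toNat 0 := by
  unfold pvRowA
  exact pvFoldl_fixed_mem _ _ _ (fun j _ => by unfold pvStepA; simp)

theorem pvInit_body (m : Int) (N : Nat) :
    (PySem.List.pyRange 0 m 1).foldl
      (fun ret j => PySem.List.pySetD ret (N : Int)
        (PySem.List.pySetD (PySem.List.pyGetD ret (N : Int) []) j 0))
      (List.replicate (N + 1) (List.replicate m.toNat (0 : Int)))
    = List.replicate (N + 1) (List.replicate m.toNat 0) := by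
  apply pvFoldl_fixed_mem
  intro j hj
  have hj0 : 0 ≤ j := (PySem.List.mem_pyRange_one.mp hj).1
  rw [PySem.List.pyGetD_natCast, List.getD_eq_getElem?_getD, List.getElem?_replicate,
    if_pos (Nat.lt_succ_self N), Option.getD_some,
    PySem.List.pySetD_of_nonneg _ _ hj0, List.set_replicate_self,
    PySem.List.pySetD_natCast, List.set_replicate_self]

theorem pvInitA_eq (n m : Int) :
    pvInitA n m = List.replicate n.toNat (List.replicate m.toNat 0) := by
  unfold pvInitA
  rw [PySem.List.pyRange_one 0 n, List.foldl_map]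
  simp only [zero_add]
  have hm : (n - 0).toNat = n.toNat := by omega
  rw [hm]
  generalize n.toNat = N
  induction N with
  | zero => rfl
  | succ N ih =>
    rw [List.range_succ, List.foldl_append, ih, List.foldl_cons, List.foldl_nil,
      ← List.replicate_succ']
    exact pvInit_body m N

theorem pvInner_commute (muts : List String) (i : Int) :
    ∀ (l : List Int) (G : List (List Int)), 0 ≤ i → i.toNat < G.length →
    l.foldl (fun G j => if muts.contains (PySem.Int.toStr j) then
        PySem.List.pySetD G i (PySem.List.pySetD (PySem.List.pyGetD G i []) j 1) else G) G
    = G.set i.toNat (l.foldl (pvStepA muts) (G.getD i.toNat [])) := by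
  intro l
  induction l with
  | nil =>
    intro G h0 hlt
    simp only [List.foldl_nil]
    rw [List.getD_eq_getElem?_getD, List.getElem?_eq_getElem hlt, Option.getD_some,
      List.set_getElem_self]
  | cons j l ihl =>
    intro G h0 hlt
    rw [List.foldl_cons, List.foldl_cons]
    by_cases hc : muts.contains (PySem.Int.toStr j)
    · rw [if_pos hc, PySem.List.pySetD_of_nonneg _ _ h0,
        ihl _ h0 (by simpa using hlt), List.set_set]
      congr 1
      rw [List.getD_eq_getElem?_getD, List.getElem?_set, if_pos rfl, if_pos hlt,
        Option.getD_some, PySem.List.pyGetD_of_nonneg _ _ h0]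
      unfold pvStepA
      rw [if_pos hc]
    · rw [if_neg hc, ihl _ h0 hlt]
      congr 1
      unfold pvStepA
      rw [if_neg hc]

theorem pvA_main (m : Int) (dd : PySem.Dict String (List String)) :
    ∀ (N R : Nat),
    (List.range N).foldl (fun G (k : Nat) =>
      match dd.get? (PySem.Int.toStr (k : Int)) with
      | some mut_array_ =>
        (PySem.List.pyRange 0 m 1).foldl (fun G j =>
          if mut_array_.contains (PySem.Int.toStr j) then
            PySem.List.pySetD G (k : Int)
              (PySem.List.pySetD (PySem.List.pyGetD G (k : Int) []) j (1 : Int))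
          else G) G
      | none => G)
      (List.replicate (N + R) (List.replicate m.toNat (0 : Int)))
    = (List.range N).map (fun (k : Nat) => pvRowA m (dd.getD (PySem.Int.toStr (k : Int)) []))
      ++ List.replicate R (List.replicate m.toNat (0 : Int)) := by
  intro N
  induction N with
  | zero => intro R; simp
  | succ N ih =>
    intro R
    rw [List.range_succ, List.foldl_append, List.foldl_cons, List.foldl_nil]
    have hNR : N + 1 + R = N + (R + 1) := by omega
    rw [hNR, ih (R + 1)]
    rcases hg : dd.get? (PySem.Int.toStr (N : Int)) with _ | muts
    · have hgetD : dd.getD (PySem.Int.toStr (N : Int)) [] = [] := by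
        rw [PySem.Dict.getD_eq_get?_getD, hg]; rfl
      simp only [List.replicate_succ]
      simp
      rw [hgetD, pvRowA_nil]
    · have hlen : ((N : Int)).toNat <
          ((List.range N).map (fun (k : Nat) => pvRowA m (dd.getD (PySem.Int.toStr (k : Int)) []))
            ++ List.replicate (R + 1) (List.replicate m.toNat (0 : Int))).length := by
        simp
      refine Eq.trans (pvInner_commute muts (N : Int) (PySem.List.pyRange 0 m 1) _
          (Int.natCast_nonneg N) hlen) ?_
      have hmuts : dd.getD (PySem.Int.toStr (N : Int)) [] = muts := by
        rw [PySem.Dict.getD_eq_get?_getD, hg]; rfl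
      have hgetD : ((List.range N).map
            (fun (k : Nat) => pvRowA m (dd.getD (PySem.Int.toStr (k : Int)) []))
          ++ List.replicate (R + 1) (List.replicate m.toNat (0 : Int))).getD
            ((N : Int)).toNat [] = List.replicate m.toNat (0 : Int) := by
        rw [Int.toNat_natCast, List.getD_eq_getElem?_getD,
          List.getElem?_append_right (by simp)]
        simp
      rw [hgetD]
      have hrow : (PySem.List.pyRange 0 m 1).foldl (pvStepA muts)
          (List.replicate m.toNat (0 : Int)) = pvRowA m muts := rfl
      rw [hrow, Int.toNat_natCast, List.set_append, if_neg (by simp)]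
      simp only [List.length_map, List.length_range, Nat.sub_self, List.replicate_succ,
        List.set_cons_zero]
      simp [hmuts]

theorem makeG_eq_map (n m : Int) (d : List (String × List String)) :
    makeG n m d = (PySem.List.pyRange 0 n 1).map (fun i =>
      pvRowA m ((PySem.Dict.mk d).getD (PySem.Int.toStr i) [])) := by
  unfold makeG
  rw [pvInitA_eq, PySem.List.pyRange_one 0 n, List.foldl_map, List.map_map]
  simp only [zero_add]
  have hm : (n - 0).toNat = n.toNat := by omega
  rw [hm]
  have h := pvA_main m (PySem.Dict.mk d) n.toNat 0
  rw [Nat.add_zero] at h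
  exact h.trans (by simp)

theorem makeG_alt_eq_map (n m : Int) (d : List (String × List String)) :
    makeG_alt n m d = (PySem.List.pyRange 0 n 1).map (fun i =>
      pvRowB m ((PySem.Dict.mk d).getD (PySem.Int.toStr i) [])) := by
  by_cases hn : n ≤ 0
  · unfold makeG_alt
    rw [if_pos hn, PySem.List.pyRange_one_eq_nil hn]
    rfl
  · have h : makeG_alt n m d = (PySem.List.pyRange 0 n 1).foldl
        (fun G i => G ++ [pvRowB m ((PySem.Dict.mk d).getD (PySem.Int.toStr i) [])]) [] := by
      unfold makeG_alt
      rw [if_neg hn]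
      rfl
    rw [h, pvFoldl_snoc]
    simp

-- ===== VERDICT (by name: the statement is the Claim_ definition above) =====
theorem makeG_spec : Claim_equal_makeG := by
  intro n m d _
  unfold Spec_makeG
  rw [makeG_eq_map, makeG_alt_eq_map]
  exact List.map_congr_left fun i _ => pvRowA_eq_pvRowB m _
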